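-- pv_equiv track=rewrite | github.com/aliceni7/transformations | matrix.py | make_scale
-- ===== SOURCE A (Python) =====
-- def make_scale( x, y, z ):
--     matrix = new_matrix(4,4)
--     ident(matrix)
--     for row in range( len(matrix[0]) - 1 ):
--         for col in range( len(matrix) ):
--             if row == col:
--                 matrix[col][row] = x
--                 x = y
--                 y = z
--     return matrix
--
-- def ident( matrix ):
--     for r in range( len( matrix[0] ) ):
--         for c in range( len(matrix) ):
--             if r == c:
--                 matrix[c][r] = 1
--             else:
--                 matrix[c][r] = 0
--
-- def new_matrix(rows = 4, cols = 4):
--     m = []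
--     for c in range( cols ):
--         m.append( [] )
--         for r in range( rows ):
--             m[c].append( 0 )
--     return m
-- ===== SOURCE B (Python) =====
-- def make_scale(x, y, z):
--     # Closed-form: return the 4x4 scale matrix directly as a literal.
--     return [[x, 0, 0, 0],
--             [0, y, 0, 0],
--             [0, 0, z, 0],
--             [0, 0, 0, 1]]
-- ===== Notes on version B (the rewrite author's own statement) =====
-- stated objective: simpler
-- what changed: B returns the 4x4 scale matrix as a single closed-form literal instead of A's building a zero matrix, overwriting it into an identity, and then mutating the diagonal in nested index loops.
import Mathlib
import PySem

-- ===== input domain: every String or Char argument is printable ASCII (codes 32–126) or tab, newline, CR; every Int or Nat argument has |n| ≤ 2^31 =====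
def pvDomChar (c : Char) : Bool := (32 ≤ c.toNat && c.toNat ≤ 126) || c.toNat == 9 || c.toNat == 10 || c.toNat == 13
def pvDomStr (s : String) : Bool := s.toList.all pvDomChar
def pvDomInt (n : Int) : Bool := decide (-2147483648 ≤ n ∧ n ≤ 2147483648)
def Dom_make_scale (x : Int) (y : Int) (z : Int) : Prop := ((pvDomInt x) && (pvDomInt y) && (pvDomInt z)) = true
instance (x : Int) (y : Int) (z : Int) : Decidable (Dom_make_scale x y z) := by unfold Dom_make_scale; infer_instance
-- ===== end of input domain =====

-- B replaces A's build-zero/identity/mutate-diagonal loops with one closed-form literal (simpler).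

-- ===== PORT A =====
-- helper: new_matrix(rows, cols)
def pv_new_matrix (rows : Int) (cols : Int) : List (List Int) :=
  (PySem.List.pyRange 0 cols 1).foldl (fun m c =>
    let m := m ++ [([] : List Int)]
    (PySem.List.pyRange 0 rows 1).foldl (fun m _r =>
      m.modify c.toNat (fun row => row ++ [0])) m) []

-- helper: ident(matrix)  (returns the mutated matrix)
def pv_ident (matrix : List (List Int)) : List (List Int) :=
  (PySem.List.pyRange 0 (((PySem.List.pyGet? matrix 0).getD []).length : Int) 1).foldl (fun mat r =>
    (PySem.List.pyRange 0 (mat.length : Int) 1).foldl (fun mat c =>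
      if r == c then mat.modify c.toNat (fun row => row.set r.toNat 1)
      else mat.modify c.toNat (fun row => row.set r.toNat 0)) mat) matrix

def make_scale (x : Int) (y : Int) (z : Int) : List (List Int) :=
  let matrix := pv_new_matrix 4 4
  let matrix := pv_ident matrix
  let st :=
    (PySem.List.pyRange 0 ((((PySem.List.pyGet? matrix 0).getD []).length : Int) - 1) 1).foldl
      (fun (st : List (List Int) × Int × Int) row =>
        (PySem.List.pyRange 0 (st.1.length : Int) 1).foldl (fun st col =>
          if row == col then
            (st.1.modify col.toNat (fun r => r.set row.toNat st.2.1), st.2.2, z)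
          else st) st) (matrix, x, y)
  st.1

-- ===== PORT B =====
def make_scale_alt (x : Int) (y : Int) (z : Int) : List (List Int) :=
  [[x, 0, 0, 0],
   [0, y, 0, 0],
   [0, 0, z, 0],
   [0, 0, 0, 1]]

-- ===== PRECONDITION & SPEC =====
def Spec_make_scale (x : Int) (y : Int) (z : Int) (out : List (List Int)) : Prop := out = make_scale_alt x y z
instance (x : Int) (y : Int) (z : Int) (out : List (List Int)) : Decidable (Spec_make_scale x y z out) := by unfold Spec_make_scale; infer_instance

-- ===== CLAIM (what is proved, stated in full; the proofs are below) =====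
def Claim_equal_make_scale : Prop := ∀ (x : Int) (y : Int) (z : Int), Dom_make_scale x y z → Spec_make_scale x y z (make_scale x y z)

-- ===== LEMMAS AND PROOFS =====
theorem pv_nm4 : pv_new_matrix 4 4 = [[0,0,0,0],[0,0,0,0],[0,0,0,0],[0,0,0,0]] := by decide

theorem pv_id4 : pv_ident [[0,0,0,0],[0,0,0,0],[0,0,0,0],[0,0,0,0]] =
    [[1,0,0,0],[0,1,0,0],[0,0,1,0],[0,0,0,1]] := by decide

theorem pv_r3 : PySem.List.pyRange 0 3 1 = [0,1,2] := by decide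
theorem pv_r4 : PySem.List.pyRange 0 4 1 = [0,1,2,3] := by decide

-- ===== VERDICT (by name: the statement is the Claim_ definition above) =====
theorem make_scale_spec : Claim_equal_make_scale := by
  intro x y z _
  show make_scale x y z = make_scale_alt x y z
  unfold make_scale
  simp only [pv_nm4, pv_id4]
  norm_num [PySem.List.pyGet?, PySem.List.pyIdx?, pv_r3, pv_r4,
            List.foldl, List.modify, List.set, make_scale_alt]
  norm_num [List.modifyTailIdx, List.modifyTailIdx.go, List.modifyHead, List.set, Int.toNat]
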